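-- pv_equiv track=rewrite | github.com/therealityreport/screenalytics | apps/api/services/identities.py | _faces_by_track
-- ===== SOURCE A (Python) =====
-- from typing import Any, Dict, Generator, Iterable, List, Sequence
--
-- def _faces_by_track(rows: Sequence[Dict[str, Any]]) -> Dict[int, List[Dict[str, Any]]]:
--     grouped: Dict[int, List[Dict[str, Any]]] = {}
--     for row in rows:
--         try:
--             track_id = int(row.get("track_id", -1))
--         except (TypeError, ValueError):
--             continue
--         grouped.setdefault(track_id, []).append(row)
--     for items in grouped.values():
--         items.sort(key=lambda r: int(r.get("frame_idx", 0)))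
--     return grouped
-- ===== SOURCE B (Python) =====
-- def _faces_by_track(rows):
--     # One global stable sort by frame_idx instead of a per-group sort.
--     keyed = []
--     for row in rows:
--         try:
--             tid = int(row.get("track_id", -1))
--         except (TypeError, ValueError):
--             continue
--         keyed.append((tid, row))
--     grouped = {tid: [] for tid, _ in keyed}  # fixes first-appearance key order
--     for tid, row in sorted(keyed, key=lambda p: int(p[1].get("frame_idx", 0))):
--         grouped[tid].append(row)
--     return grouped
-- ===== Notes on version B (the rewrite author's own statement) =====
-- stated objective: alternative
-- what changed: B replaces A's per-group in-place sorts by a single global stable sort by frame_idx followed by a grouping pass, with the dict key order fixed by a first-appearance pass; stability makes each group come out in frame order.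
import Mathlib
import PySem

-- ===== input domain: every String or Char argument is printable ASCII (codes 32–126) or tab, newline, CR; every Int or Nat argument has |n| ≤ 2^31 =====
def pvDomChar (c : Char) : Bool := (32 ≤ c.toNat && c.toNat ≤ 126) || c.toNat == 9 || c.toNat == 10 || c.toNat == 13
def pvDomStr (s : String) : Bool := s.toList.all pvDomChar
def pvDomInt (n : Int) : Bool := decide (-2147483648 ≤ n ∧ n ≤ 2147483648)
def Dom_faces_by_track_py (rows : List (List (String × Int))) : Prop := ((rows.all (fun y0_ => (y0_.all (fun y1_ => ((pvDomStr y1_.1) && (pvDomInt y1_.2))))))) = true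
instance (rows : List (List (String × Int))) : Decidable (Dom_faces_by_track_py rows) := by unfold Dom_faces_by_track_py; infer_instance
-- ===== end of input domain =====

-- B replaces A's per-group sorts by one global stable sort by frame_idx plus a grouping pass
-- (key order fixed by a first-appearance pass): an alternative decomposition of the same grouping task.


-- ===== PORT A =====
-- rows' values are Int here, so Python's int(...) is the identity and the try/except never fires.
def faces_by_track_py (rows : List (List (String × Int))) : List (Int × List (List (String × Int))) :=
  let grouped := rows.foldl (fun d row =>
    let track_id : Int := (PySem.Dict.mk row).getD "track_id" (-1)
    d.modify track_id [] (fun xs => xs ++ [row])) PySem.Dict.empty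
  -- 'for items in grouped.values(): items.sort(key=...)' mutates each value in place
  grouped.items.map (fun p =>
    (p.1, PySem.List.sorted p.2 (fun r => (PySem.Dict.mk r).getD "frame_idx" 0)))

-- ===== PORT B =====
def faces_by_track_py_alt (rows : List (List (String × Int))) : List (Int × List (List (String × Int))) :=
  let keyed := rows.foldl (fun acc row =>
    acc ++ [(((PySem.Dict.mk row).getD "track_id" (-1) : Int), row)]) []
  let grouped0 := keyed.foldl (fun d p => d.insert p.1 ([] : List (List (String × Int)))) PySem.Dict.empty
  -- 'grouped[tid].append(row)': the key is always present, so d[k].append = modify k [] (· ++ [row])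
  let grouped := (PySem.List.sorted keyed (fun p => (PySem.Dict.mk p.2).getD "frame_idx" 0)).foldl
    (fun d p => d.modify p.1 [] (fun xs => xs ++ [p.2])) grouped0
  grouped.items

-- ===== PRECONDITION & SPEC =====
def Spec_faces_by_track_py (rows : List (List (String × Int))) (out : List (Int × List (List (String × Int)))) : Prop := out = faces_by_track_py_alt rows
instance (rows : List (List (String × Int))) (out : List (Int × List (List (String × Int)))) : Decidable (Spec_faces_by_track_py rows out) := by unfold Spec_faces_by_track_py; infer_instance

-- ===== CLAIM (what is proved, stated in full; the proofs are below) =====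
def Claim_equal_faces_by_track_py : Prop := ∀ (rows : List (List (String × Int))), Dom_faces_by_track_py rows → Spec_faces_by_track_py rows (faces_by_track_py rows)

-- ===== LEMMAS AND PROOFS =====

-- insertBy commutes with map when the comparison factors through the mapped function
theorem insertBy_map {α β : Type} (before : β → β → Bool) (f : α → β) (x : α) (acc : List α) :
    PySem.List.insertBy before (f x) (acc.map f)
      = (PySem.List.insertBy (fun a b => before (f a) (f b)) x acc).map f := by
  induction acc with
  | nil => simp [PySem.List.insertBy]
  | cons y ys ih =>
    by_cases h : before (f x) (f y)
    · simp [PySem.List.insertBy, h]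
    · simp [PySem.List.insertBy, h, ih]

-- a stable sort of a mapped list is the mapped stable sort under the composed key
theorem sorted_map_comp {α β : Type} (f : α → β) (key : β → Int) (l : List α) :
    PySem.List.sorted (l.map f) key
      = (PySem.List.sorted l (fun x => key (f x))).map f := by
  induction l using List.reverseRecOn with
  | nil => simp [PySem.List.sorted]
  | append_singleton l x ih =>
    have e1 : PySem.List.sorted ((l ++ [x]).map f) key
        = PySem.List.insertBy (fun a b => decide (key a < key b)) (f x)
            (PySem.List.sorted (l.map f) key) := by
      simp [PySem.List.sorted, List.foldl_append]
    have e2 : PySem.List.sorted (l ++ [x]) (fun y => key (f y))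
        = PySem.List.insertBy (fun a b => decide (key (f a) < key (f b))) x
            (PySem.List.sorted l (fun y => key (f y))) := by
      simp [PySem.List.sorted, List.foldl_append]
    rw [e1, e2, ih, insertBy_map]

-- inserting into a key-sorted list commutes with filtering
theorem filter_insertBy {α : Type} (key : α → Int) (p : α → Bool) (x : α) (acc : List α)
    (h : acc.Pairwise (fun a b => key a ≤ key b)) :
    (PySem.List.insertBy (fun a b => decide (key a < key b)) x acc).filter p
      = if p x then PySem.List.insertBy (fun a b => decide (key a < key b)) x (acc.filter p)
        else acc.filter p := by
  induction acc with
  | nil => by_cases hp : p x <;> simp [PySem.List.insertBy, hp]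
  | cons y ys ih =>
    have hpair := h
    rw [List.pairwise_cons] at hpair
    by_cases hlt : key x < key y
    · -- x goes in front; every kept element of y :: ys has key ≥ key y > key x
      have hfront : ∀ (m : List α), (∀ z ∈ m, key x < key z) →
          PySem.List.insertBy (fun a b => decide (key a < key b)) x m = x :: m := by
        intro m hm
        cases m with
        | nil => simp [PySem.List.insertBy]
        | cons z t => simp [PySem.List.insertBy, hm z (by simp)]
      by_cases hp : p x
      · simp only [PySem.List.insertBy, hlt, decide_true, if_true, hp]
        rw [hfront ((y :: ys).filter p)]
        · simp [hp]
        · intro z hz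
          have hzmem := List.mem_of_mem_filter hz
          rcases List.mem_cons.mp hzmem with rfl | hzt
          · exact hlt
          · exact lt_of_lt_of_le hlt (hpair.1 z hzt)
      · simp [PySem.List.insertBy, hlt, hp]
    · have hys := hpair.2
      by_cases hp : p x
      · by_cases hpy : p y
        · simp [PySem.List.insertBy, hlt, hpy, ih hys, hp]
        · simp [PySem.List.insertBy, hlt, hpy, ih hys, hp]
      · by_cases hpy : p y <;> simp [PySem.List.insertBy, hlt, hpy, ih hys, hp]

-- a stable sort commutes with filtering
theorem sorted_filter {α : Type} (key : α → Int) (p : α → Bool) (l : List α) :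
    (PySem.List.sorted l key).filter p = PySem.List.sorted (l.filter p) key := by
  induction l using List.reverseRecOn with
  | nil => simp [PySem.List.sorted]
  | append_singleton l x ih =>
    have e1 : PySem.List.sorted (l ++ [x]) key
        = PySem.List.insertBy (fun a b => decide (key a < key b)) x (PySem.List.sorted l key) := by
      simp [PySem.List.sorted, List.foldl_append]
    rw [e1, filter_insertBy key p x _ (PySem.List.sorted_pairwise l key)]
    by_cases hp : p x
    · have e2 : PySem.List.sorted (l.filter p ++ [x]) key
          = PySem.List.insertBy (fun a b => decide (key a < key b)) x
              (PySem.List.sorted (l.filter p) key) := by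
        simp [PySem.List.sorted, List.foldl_append]
      simp [hp, ih, e2]
    · simp [hp, ih]

-- the first-appearance pass only ever stores [], so every getD with default [] is []
theorem getD_foldl_insert_nil {κ β : Type} [BEq κ] [LawfulBEq κ] [DecidableEq κ]
    (l : List (κ × β)) (d : PySem.Dict κ (List β)) (c : κ) (h : d.getD c [] = []) :
    (l.foldl (fun d p => d.insert p.1 ([] : List β)) d).getD c [] = [] := by
  induction l generalizing d with
  | nil => exact h
  | cons q t ih =>
    simp only [List.foldl_cons]
    exact ih _ (by rw [PySem.Dict.getD_insert]; split <;> simp [h])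

-- updating a set with elements it already contains leaves it unchanged
theorem set_update_of_forall_mem {α : Type} [BEq α] [LawfulBEq α]
    (l : List α) (s : PySem.Set α) (h : ∀ x ∈ l, x ∈ (s : List α)) :
    PySem.Set.update s l = s := by
  induction l generalizing s with
  | nil => rfl
  | cons y t ih =>
    have hy : PySem.Set.add s y = s := by
      simp [PySem.Set.add]
      exact h y (by simp)
    show PySem.Set.update (PySem.Set.add s y) t = s
    rw [hy]
    exact ih s (fun x hx => h x (by simp [hx]))

-- the two ports agree everywhere
theorem faces_by_track_eq (rows : List (List (String × Int))) :
    faces_by_track_py rows = faces_by_track_py_alt rows := by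
  show (List.map (fun p => (p.1, PySem.List.sorted p.2 (fun r => (PySem.Dict.mk r).getD "frame_idx" 0)))
      (List.foldl (fun d row => d.modify ((PySem.Dict.mk row).getD "track_id" (-1) : Int) [] (fun xs => xs ++ [row])) PySem.Dict.empty rows).items)
    = (List.foldl (fun d p => d.modify p.1 [] (fun xs => xs ++ [p.2]))
        (List.foldl (fun d p => d.insert p.1 ([] : List (List (String × Int)))) PySem.Dict.empty
          (List.foldl (fun acc row => acc ++ [(((PySem.Dict.mk row).getD "track_id" (-1) : Int), row)]) [] rows))
        (PySem.List.sorted (List.foldl (fun acc row => acc ++ [(((PySem.Dict.mk row).getD "track_id" (-1) : Int), row)]) [] rows)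
          (fun p => (PySem.Dict.mk p.2).getD "frame_idx" 0))).items
  set tid : List (String × Int) → Int := fun r => (PySem.Dict.mk r).getD "track_id" (-1) with htid
  set fr : List (String × Int) → Int := fun r => (PySem.Dict.mk r).getD "frame_idx" 0 with hfr
  set keyed : List (Int × List (String × Int)) := rows.map (fun r => (tid r, r)) with hkeyed
  -- B's first loop builds exactly `keyed`
  have hkb : rows.foldl (fun acc row => acc ++ [(((PySem.Dict.mk row).getD "track_id" (-1) : Int), row)]) []
      = keyed := by
    rw [PySem.List.foldl_append_singleton_eq_map]; rfl
  rw [hkb]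
  -- A's loop over rows is the pair-loop over keyed
  have hka : rows.foldl (fun d row => d.modify ((PySem.Dict.mk row).getD "track_id" (-1) : Int) []
        (fun xs => xs ++ [row])) PySem.Dict.empty
      = keyed.foldl (fun d p => d.modify p.1 [] (fun xs => xs ++ [p.2])) PySem.Dict.empty := by
    rw [hkeyed, List.foldl_map]
  rw [hka]
  set dA := keyed.foldl (fun d p => d.modify p.1 [] (fun xs => xs ++ [p.2])) PySem.Dict.empty with hdA
  set d0 := keyed.foldl (fun d p => d.insert p.1 ([] : List (List (String × Int)))) PySem.Dict.empty with hd0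
  set sk := PySem.List.sorted keyed (fun p => (PySem.Dict.mk p.2).getD "frame_idx" 0) with hsk
  set dB := sk.foldl (fun d p => d.modify p.1 [] (fun xs => xs ++ [p.2])) d0 with hdB
  -- keys coincide
  have hkA : dA.keys = PySem.Set.update PySem.Dict.empty.keys (keyed.map Prod.fst) :=
    PySem.Dict.keys_foldl_modify_key keyed Prod.fst [] (fun _ p xs => xs ++ [p.2]) PySem.Dict.empty
  have hk0 : d0.keys = PySem.Set.update PySem.Dict.empty.keys (keyed.map Prod.fst) :=
    PySem.Dict.keys_foldl_insert_key keyed Prod.fst (fun _ _ => []) PySem.Dict.empty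
  have hkB : dB.keys = d0.keys := by
    have := PySem.Dict.keys_foldl_modify_key sk Prod.fst [] (fun _ p xs => xs ++ [p.2]) d0
    rw [hdB, this]
    apply set_update_of_forall_mem
    intro x hx
    rcases List.mem_map.mp hx with ⟨q, hq, rfl⟩
    have hqk : q ∈ keyed := (PySem.List.sorted_perm keyed _ false).mem_iff.mp (hsk ▸ hq)
    rw [hk0]
    show q.1 ∈ PySem.Set.ofList (keyed.map Prod.fst)
    exact (PySem.Set.mem_ofList _ _).mpr (List.mem_map_of_mem hqk)
  have hkeq : dA.keys = dB.keys := by rw [hkA, hkB, hk0]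
  -- nodup keys on both sides
  have hndA : dA.keys.Nodup :=
    PySem.Dict.nodup_keys_foldl_modify_key keyed Prod.fst [] (fun _ p xs => xs ++ [p.2])
      PySem.Dict.empty (by simp)
  have hndB : dB.keys.Nodup := by rw [hkB, hk0, ← hkA]; exact hndA
  -- getD values
  have hvA : ∀ c : Int, dA.getD c [] = (keyed.filter (fun p => p.1 == c)).map (fun x => x.2) := by
    intro c
    have := PySem.Dict.getD_foldl_modify_append keyed PySem.Dict.empty c
    rw [hdA, this]; simp
  have hvB : ∀ c : Int, dB.getD c []
      = (sk.filter (fun p => p.1 == c)).map (fun x => x.2) := by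
    intro c
    have := PySem.Dict.getD_foldl_modify_append sk d0 c
    rw [hdB, this, getD_foldl_insert_nil keyed PySem.Dict.empty c (by simp)]
    rfl
  -- assemble: items as maps over the (equal) key lists, pointwise equal entries
  rw [PySem.Dict.items_eq_map_keys dA hndA [], PySem.Dict.items_eq_map_keys dB hndB [],
      ← hkeq, List.map_map]
  apply List.map_congr_left
  intro k _
  simp only [Function.comp]
  refine congrArg (fun v => (k, v)) ?_
  rw [hvA k, hvB k]
  have hsf : sk.filter (fun p => p.1 == k)
      = PySem.List.sorted (keyed.filter (fun p => p.1 == k))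
          (fun p => (PySem.Dict.mk p.2).getD "frame_idx" 0) := by
    rw [hsk]; exact sorted_filter _ _ keyed
  rw [hsf, ← sorted_map_comp Prod.snd fr]

-- ===== VERDICT (by name: the statement is the Claim_ definition above) =====
theorem faces_by_track_py_spec : Claim_equal_faces_by_track_py := by
  intro rows _
  unfold Spec_faces_by_track_py
  exact faces_by_track_eq rows
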